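/- GENERATED by mk_final_copies.py from the proof of the farm's unit `vorbis_decode_initial.4` (farm:vorbis_decode_initial.4.1: Proof.lean) as the
   re-elaboration sweep compiled it — do not edit. -/
import Asan.CheckWalk
import Vorbis.Spec.Units.vorbis_decode_initial_4

open X86 X86.User Asan Vorbis Vorbis.Spec Vorbis.Spec.vorbis_decode_initial

set_option maxRecDepth 4000
set_option maxHeartbeats 4000000

/-- Segment 4 of `vorbis_decode_initial` (0x1131fa–0x113219, 8 instructions, one check site, calls ilog and get_bits; stb_vorbis_fixed.c 3172):
from the exit of the retry loop to the return `cut7` of `get_bits(f, ilog(f->mode_count-1))`: `IAt` again, ebp = 0, the result below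
`2 ^ 31` (`ilogVal_le_of_lt`: ilog returns at most 31 for every `int`; SH7 through `DecodeInv.tables_kept`). The farm worker's `tail1`. -/
theorem Vorbis.Spec.Worked.vorbis_decode_initial_4_ok : Vorbis.Spec.vorbis_decode_initial_4.Statement := by
  intro Lay hLay μ hμ u₀ hcode hload4 h_gb h_ilog others frames len A stored room ysz u ret s hE hs hrbp
  have he := hE.entry
  have hpre := hE.pre
  have hgb := h_gb others frames (RunBlk A len) len
  have hilog := h_ilog others frames
  v_entry he
  have hsp := hpre.1.rsp
  have hstores := di_stores_ok hpre (by omega)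
  obtain ⟨hsh, hinv, hpls, hple, hprs, hpre_, hpm, hapart⟩ := hpre
  have hobj := hinv.objLive
  have hwhere := hobj.where_ hsh.inv hsh.offText (by decide)
  simp only [Off.sizeof.stb_vorbis] at hwhere
  have henv := hinv.readerEnv
  have hlog := hinv.g_log2
  clear hapart
  obtain ⟨w_rip, w_rsp, w_rbx, w_r12, w_r13, w_r14, w_kept, w_eq, hsame, hun, hs0, hs1, hs2, hs3, hs4, hs5, hs6, hs7, hs8,
    hdf, hmx, hbits, hcbs, hcbe⟩ := hs
  unfold iLoopRegs at w_kept
  have w_rbp := hrbp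
  u_walk hcode [hμ.vendor] until [Vorbis.L.vorbis_decode_initial.cut7] span [Vorbis.L.textLo, Vorbis.L.textHi] side (v_side)
  case check_113201 =>
    have hun' : ShadowUntouched u.mem s_113201.mem := by v_untouched
    refine hobj.accSmall hsh.inv hun' _ 4 (by decide) (by u_omega) ?_
    simp only [Vorbis.Off.sizeof.stb_vorbis]
    u_omega
  case call_inv =>
    v_inv
  case pre_11320f =>
    have hun' : ShadowUntouched u.mem s_11320f.mem := by v_untouched
    exact ⟨hsh.call hun' (by u_omega) (by u_omega) (by u_omega), hlog⟩
  -- 0x113214, the state ilog returned: at most 31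
  v_after_call w_rsp_11320f w_mem_11320f
  have hkeep := Reader.store_off_obj hbits (u.reg .rsp - 96) 8 1126932 (by u_omega) (by u_omega)
  rw [← w_mem_11320f] at hkeep
  have hpush : Mem.SameExcept _ u.mem (s.mem.writeLE (u.reg .rsp - 96) 8 1126932) :=
    Mem.SameExcept.step_writeLE' (u.reg .rsp - 96) 8 1126932 hsame (by u_omega) (by u_same_side)
  have hlog2 : Log2_4In s_11320f.mem := by
    rw [w_mem_11320f]
    exact (hinv.tables_kept (di_widen hpush) hstores).log2
  have hval := w_post.2.2 hlog2
  have hle31 : (s_11320fr.reg .rax).toNat ≤ 31 := by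
    rw [hval]
    refine ilogVal_le_of_lt _ 31 ?_ ?_
    · have := BitVec.toInt_lt (x := Word.part .w32 (s_11320f.reg .rdi))
      simp only [Width.bits] at this
      omega
    · have := BitVec.toInt_lt (x := Word.part .w32 (s_11320f.reg .rdi))
      simp only [Width.bits] at this
      omega
  have hs0r : UInt64.ofNat (s_11320fr.mem.readLE (u.reg .rsp) 8) = ret := by u_frame hs0
  have hs1r : UInt64.ofNat (s_11320fr.mem.readLE (u.reg .rsp - 8) 8) = u.reg .r15 := by u_frame hs1
  have hs2r : UInt64.ofNat (s_11320fr.mem.readLE (u.reg .rsp - 16) 8) = u.reg .r14 := by u_frame hs2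
  have hs3r : UInt64.ofNat (s_11320fr.mem.readLE (u.reg .rsp - 24) 8) = u.reg .r13 := by u_frame hs3
  have hs4r : UInt64.ofNat (s_11320fr.mem.readLE (u.reg .rsp - 32) 8) = u.reg .r12 := by u_frame hs4
  have hs5r : UInt64.ofNat (s_11320fr.mem.readLE (u.reg .rsp - 40) 8) = u.reg .rbp := by u_frame hs5
  have hs6r : UInt64.ofNat (s_11320fr.mem.readLE (u.reg .rsp - 48) 8) = u.reg .rbx := by u_frame hs6
  have hs7r : UInt64.ofNat (s_11320fr.mem.readLE (u.reg .rsp - 80) 8) = u.reg .rcx := by u_frame hs7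
  have hs8r : UInt64.ofNat (s_11320fr.mem.readLE (u.reg .rsp - 72) 8) = u.reg .r8 := by u_frame hs8
  have hcbsr : s_11320fr.mem.readLE (u.reg .rdi + 1800) 4 = 0 := by u_frame hcbs
  have hcber : s_11320fr.mem.readLE (u.reg .rdi + 1796) 4 = 0 := by u_frame hcbe
  have hunr : ShadowUntouched u.mem s_11320fr.mem := by v_untouched
  have hsamer := Reader.sameExcept_through_callee hpush w_same (by
    simp only [List.forall_mem_cons, List.not_mem_nil, false_imp_iff, implies_true, and_true, X86.User.inSpans_cons,
      X86.User.inSpans_nil, or_false]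
    repeat' apply And.intro
    all_goals u_omega)
  have hbitsr : Bits (RunBlk A len) len s_11320fr.mem (u.reg .rdi).toNat := by
    rw [← w_mem_11320f] at w_same
    exact (Reader.reader_of_window hkeep.1.bits w_same (by u_omega)).1
  obtain ⟨z, w_rax⟩ : ∃ z, s_11320fr.reg .rax = z := ⟨_, rfl⟩
  rw [w_rax] at hle31
  clear w_same hkeep hpush w_post hval hlog2 hsame hs0 hs1 hs2 hs3 hs4 hs5 hs6 hs7 hs8 hcbs hcbe hbits hun
  u_walk hcode [hμ.vendor] until [Vorbis.L.vorbis_decode_initial.cut7] span [Vorbis.L.textLo, Vorbis.L.textHi] side (v_side)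
  case call_inv =>
    v_inv
  case pre_113219 =>
    have hun' : ShadowUntouched u.mem s_113219.mem := by v_untouched
    have hsh' : ShadowPre others frames s_113219 := hsh.call hun' (by u_omega) (by u_omega) (by u_omega)
    have hkeep := Reader.store_off_obj hbitsr (u.reg .rsp - 96) 8 1126942 (by u_omega) (by u_omega)
    rw [← w_mem] at hkeep
    refine ⟨⟨hsh', ?_, ?_⟩, ?_⟩
    · rw [w_rdi]
      exact henv
    · rw [w_rdi]
      exact hkeep.1.bits
    · rw [bitsArg_def, w_rsi]
      unfold Word.ofBV
      rw [UInt64.toNat_ofBitVec, BitVec.toNat_setWidth, Asan.part32_toNat]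
      omega
  -- 0x11321e, the state get_bits returned: `i` has fewer than 32 bits
  have c_rdi2 := w_rdi_113219
  v_after_call w_rsp_113219 w_mem_113219
  simp only [c_rdi2] at w_same
  have hn : bitsArg s_113219 ≤ 31 := by
    rw [bitsArg_def, w_rsi_113219]
    unfold Word.ofBV
    rw [UInt64.toNat_ofBitVec, BitVec.toNat_setWidth, Asan.part32_toNat]
    omega
  have hpost : GetBitsPost (RunBlk A len) len s_113219.mem s_113219r.mem (u.reg .rdi).toNat (bitsArg s_113219)
      (s_113219r.reg .rax).toNat := by
    have h := w_post.bits
    rw [c_rdi2] at h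
    exact h
  have hzlt : (s_113219r.reg .rax).toNat < 2 ^ 31 := by
    have h1 := hpost.result.2 hn
    have h2 : 2 ^ bitsArg s_113219 ≤ 2 ^ 31 := Nat.pow_le_pow_right (by decide) hn
    omega
  have hs0q : UInt64.ofNat (s_113219r.mem.readLE (u.reg .rsp) 8) = ret := by u_frame hs0r
  have hs1q : UInt64.ofNat (s_113219r.mem.readLE (u.reg .rsp - 8) 8) = u.reg .r15 := by u_frame hs1r
  have hs2q : UInt64.ofNat (s_113219r.mem.readLE (u.reg .rsp - 16) 8) = u.reg .r14 := by u_frame hs2r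
  have hs3q : UInt64.ofNat (s_113219r.mem.readLE (u.reg .rsp - 24) 8) = u.reg .r13 := by u_frame hs3r
  have hs4q : UInt64.ofNat (s_113219r.mem.readLE (u.reg .rsp - 32) 8) = u.reg .r12 := by u_frame hs4r
  have hs5q : UInt64.ofNat (s_113219r.mem.readLE (u.reg .rsp - 40) 8) = u.reg .rbp := by u_frame hs5r
  have hs6q : UInt64.ofNat (s_113219r.mem.readLE (u.reg .rsp - 48) 8) = u.reg .rbx := by u_frame hs6r
  have hs7q : UInt64.ofNat (s_113219r.mem.readLE (u.reg .rsp - 80) 8) = u.reg .rcx := by u_frame hs7r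
  have hs8q : UInt64.ofNat (s_113219r.mem.readLE (u.reg .rsp - 72) 8) = u.reg .r8 := by u_frame hs8r
  have hcbsq : s_113219r.mem.readLE (u.reg .rdi + 1800) 4 = 0 := by u_frame hcbsr
  have hcbeq : s_113219r.mem.readLE (u.reg .rdi + 1796) 4 = 0 := by u_frame hcber
  have hunq : ShadowUntouched u.mem s_113219r.mem := by v_untouched
  have hpush : Mem.SameExcept _ u.mem (s_11320fr.mem.writeLE (u.reg .rsp - 96) 8 1126942) :=
    Mem.SameExcept.step_writeLE' (u.reg .rsp - 96) 8 1126942 hsamer (by u_omega) (by u_same_side)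
  have hsameq := Reader.sameExcept_through_callee hpush w_same (by
    simp only [List.forall_mem_cons, List.not_mem_nil, false_imp_iff, implies_true, and_true, X86.User.inSpans_cons,
      X86.User.inSpans_nil, or_false]
    repeat' apply And.intro
    all_goals u_omega)
  have hbitsq : Bits (RunBlk A len) len s_113219r.mem (u.reg .rdi).toNat := hpost.bits
  refine ReachVia.done ⟨?_, w_rbp, hzlt⟩
  exact ⟨w_rip, w_rsp, w_rbx, w_r12, w_r13, w_r14, w_kept.mono_all (by rfl), w_eq, hsameq, hunq, hs0q, hs1q, hs2q, hs3q,
    hs4q, hs5q, hs6q, hs7q, hs8q, w_df, w_mx, hbitsq, hcbsq, hcbeq⟩
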